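-- pv_equiv track=rewrite | github.com/Matei5/marire-retele | HTTP service/app.py | needed_prefix
-- ===== SOURCE A (Python) =====
-- def needed_prefix(hosts):
--     # calculeaza prefixul minim /X care poate sustine numarul cerut de hosturi
--     need = max(0, int(hosts))
--     capacity = 1
--     usable = -2
--     prefix = 32
--     while usable < need:
--         capacity <<= 1
--         prefix -= 1
--         usable = capacity - 2
--         if prefix < 0:
--             break
--     return prefix
-- ===== SOURCE B (Python) =====
-- def needed_prefix(hosts):
--     # smallest h with usable capacity 2**h - 2 >= need, clamped at prefix -1
--     need = max(0, int(hosts))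
--     return max(-1, 32 - (need + 1).bit_length())
-- ===== Notes on version B (the rewrite author's own statement) =====
-- stated objective: simpler
-- what changed: Replaced the capacity-doubling while loop with a closed form: prefix = max(-1, 32 - (need+1).bit_length()).
import Mathlib
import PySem

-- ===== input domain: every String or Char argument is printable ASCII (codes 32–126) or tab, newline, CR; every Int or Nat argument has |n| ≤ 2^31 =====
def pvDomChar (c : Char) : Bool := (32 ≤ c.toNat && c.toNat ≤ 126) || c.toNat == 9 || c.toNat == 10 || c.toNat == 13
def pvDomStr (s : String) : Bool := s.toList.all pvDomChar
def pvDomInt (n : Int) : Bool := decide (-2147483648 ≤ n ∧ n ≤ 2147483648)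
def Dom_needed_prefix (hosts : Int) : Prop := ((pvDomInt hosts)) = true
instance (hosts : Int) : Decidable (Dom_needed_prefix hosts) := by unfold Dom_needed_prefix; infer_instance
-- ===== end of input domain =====

-- B replaces A's capacity-doubling while loop with the closed form
-- max(-1, 32 - (need+1).bit_length()); objective: simpler.

-- ===== PORT A =====
-- the while loop of A: state (capacity, usable, pfx); 'capacity <<= 1' is capacity * 2
def pyLoopA (need capacity usable pfx : Int) : Int :=
  if usable < need then
    let capacity' := capacity * 2
    let pfx' := pfx - 1
    let usable' := capacity' - 2
    if pfx' < 0 then pfx'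
    else pyLoopA need capacity' usable' pfx'
  else pfx
termination_by pfx.toNat
decreasing_by omega

def needed_prefix (hosts : Int) : Int :=
  pyLoopA (max 0 hosts) 1 (-2) 32

-- ===== PORT B =====
-- Python's (need+1).bit_length() is Nat.size (need.toNat + 1)
def needed_prefix_alt (hosts : Int) : Int :=
  let need : Int := max 0 hosts
  max (-1) (32 - (Nat.size (need.toNat + 1) : Int))

-- ===== PRECONDITION & SPEC =====
def Spec_needed_prefix (hosts : Int) (out : Int) : Prop := out = needed_prefix_alt hosts
instance (hosts : Int) (out : Int) : Decidable (Spec_needed_prefix hosts out) := by unfold Spec_needed_prefix; infer_instance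

-- ===== CLAIM (what is proved, stated in full; the proofs are below) =====
def Claim_equal_needed_prefix : Prop := ∀ (hosts : Int), Dom_needed_prefix hosts → Spec_needed_prefix hosts (needed_prefix hosts)

-- ===== LEMMAS AND PROOFS =====

-- invariant: after j ≥ 1 doublings the state is capacity = 2^j, usable = 2^j - 2, prefix = 32 - j
lemma pyLoopA_eq (m : Nat) : ∀ (j : Nat), j ≤ 32 → j + m = 33 → ∀ (n : Int), 0 ≤ n →
    pyLoopA n ((2:Int)^j) ((2:Int)^j - 2) (32 - (j:Int)) =
      (if Nat.size (n.toNat + 1) ≤ j then 32 - (j:Int)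
       else if Nat.size (n.toNat + 1) ≤ 32 then 32 - (Nat.size (n.toNat + 1) : Int) else -1) := by
  induction m with
  | zero => intro j hj hm; omega
  | succ m ih =>
    intro j hj hm n hn
    have hpow : ((2:Int)^j) = ((2^j : Nat) : Int) := by push_cast; ring
    have hsz : j < Nat.size (n.toNat + 1) ↔ 2^j ≤ n.toNat + 1 := Nat.lt_size
    rw [pyLoopA]
    by_cases hlt : (2:Int)^j - 2 < n
    · have hjs : j < Nat.size (n.toNat + 1) := by
        rw [hsz]; rw [hpow] at hlt; omega
      rw [if_pos hlt]
      by_cases hj32 : j = 32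
      · subst hj32
        norm_num
        omega
      · have hge : ¬ (32 - (j:Int) - 1 < 0) := by omega
        simp only [hge, if_false]
        have hcap : (2:Int)^j * 2 = (2:Int)^(j+1) := by ring
        have hpre : 32 - (j:Int) - 1 = 32 - ((j+1 : Nat) : Int) := by push_cast; ring
        rw [hcap, hpre]
        rw [ih (j+1) (by omega) (by omega) n hn]
        have : ¬ Nat.size (n.toNat + 1) ≤ j := by omega
        split_ifs <;> push_cast <;> omega
    · have hjs : Nat.size (n.toNat + 1) ≤ j := by
        by_contra h
        rw [not_le, hsz, ← Nat.not_lt] at h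
        rw [hpow] at hlt; omega
      rw [if_neg hlt, if_pos hjs]

lemma needed_prefix_eq (hosts : Int) : needed_prefix hosts = needed_prefix_alt hosts := by
  unfold needed_prefix needed_prefix_alt
  set n := max 0 hosts with hn
  have hn0 : 0 ≤ n := le_max_left _ _
  have hs1 : 1 ≤ Nat.size (n.toNat + 1) := Nat.size_pos.mpr (by omega)
  rw [pyLoopA]
  have hlt : (-2 : Int) < n := by omega
  rw [if_pos hlt]
  norm_num
  have h := pyLoopA_eq 32 1 (by omega) (by omega) n hn0
  norm_num at h
  rw [h]
  split_ifs <;> omega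

-- ===== VERDICT (by name: the statement is the Claim_ definition above) =====
theorem needed_prefix_spec : Claim_equal_needed_prefix := by
  intro hosts _
  unfold Spec_needed_prefix
  exact needed_prefix_eq hosts
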